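-- pv_equiv track=rewrite | github.com/gali1998/ExtendedIntroToCSHomework | 3/tomer.py | tomer_cycle
-- ===== SOURCE A (Python) =====
-- def tomer_cycle(n):
--     lst=[]
--     for i in range(n):
--         lst.append([])
--         for j in range(n):
--             if j-1 ==i or j+1==i:
--                 lst[i].append(1)
--             elif i-j == n-1 or i-j==1-n:
--                 lst[i].append(1)
--             else:
--                 lst[i].append(0)
--     return lst
-- ===== SOURCE B (Python) =====
-- def tomer_cycle(n):
--     m = [[0] * n for _ in range(n)]
--     for i in range(n):
--         m[i][(i + 1) % n] = 1
--         m[i][(i - 1) % n] = 1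
--     return m
-- ===== Notes on version B (the rewrite author's own statement) =====
-- stated objective: simpler
-- what changed: B pre-fills an all-zero n x n matrix and writes only the two neighbour entries per row via modular indexing, instead of testing every cell with A's four-way conditional.
import Mathlib
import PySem

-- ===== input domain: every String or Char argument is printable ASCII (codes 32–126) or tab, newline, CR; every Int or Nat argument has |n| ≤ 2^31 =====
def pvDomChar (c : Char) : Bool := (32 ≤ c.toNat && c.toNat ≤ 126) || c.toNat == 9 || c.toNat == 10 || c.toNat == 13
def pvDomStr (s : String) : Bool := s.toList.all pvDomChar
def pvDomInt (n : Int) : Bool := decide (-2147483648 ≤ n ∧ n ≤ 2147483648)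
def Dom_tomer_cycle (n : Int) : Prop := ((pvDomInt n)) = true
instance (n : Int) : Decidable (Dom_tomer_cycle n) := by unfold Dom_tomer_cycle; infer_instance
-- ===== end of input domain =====

-- B builds an all-zero matrix and writes only the two neighbour entries per row (modular
-- indexing), instead of A's four-way conditional test on every cell: simpler, fewer tests.

-- ===== PORT A =====
-- literal port of A: for each i in range(n), build row by appending: for each j in range(n),
-- 1 if j-1==i or j+1==i, elif i-j==n-1 or i-j==1-n then 1, else 0
def tomer_cycle (n : Int) : List (List Int) :=
  (List.range n.toNat).map (fun (i : Nat) =>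
    (List.range n.toNat).map (fun (j : Nat) =>
      if (j : Int) - 1 = (i : Int) ∨ (j : Int) + 1 = (i : Int) then (1 : Int)
      else if (i : Int) - (j : Int) = n - 1 ∨ (i : Int) - (j : Int) = 1 - n then 1
      else 0))

-- ===== PORT B =====
-- literal port of Source B: m = [[0]*n for _ in range(n)]; for i: m[i][(i+1)%n]=1; m[i][(i-1)%n]=1
def tomer_cycle_alt (n : Int) : List (List Int) :=
  let m0 := (List.range n.toNat).map (fun (_ : Nat) => List.replicate n.toNat (0 : Int))
  (List.range n.toNat).foldl (fun m (i : Nat) =>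
    let m1 := m.set i ((m.getD i []).set (PySem.Int.mod ((i : Int) + 1) n).toNat 1)
    m1.set i ((m1.getD i []).set (PySem.Int.mod ((i : Int) - 1) n).toNat 1)) m0

-- ===== PRECONDITION & SPEC =====
def Spec_tomer_cycle (n : Int) (out : List (List Int)) : Prop := out = tomer_cycle_alt n
instance (n : Int) (out : List (List Int)) : Decidable (Spec_tomer_cycle n out) := by unfold Spec_tomer_cycle; infer_instance

-- ===== CLAIM (what is proved, stated in full; the proofs are below) =====
def Claim_equal_tomer_cycle : Prop := ∀ (n : Int), Dom_tomer_cycle n → Spec_tomer_cycle n (tomer_cycle n)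

-- ===== LEMMAS AND PROOFS =====

-- row written by B's loop for vertex i
def pvBRow (n : Int) (N i : Nat) : List Int :=
  ((List.replicate N (0 : Int)).set (PySem.Int.mod ((i : Int) + 1) n).toNat 1).set
    (PySem.Int.mod ((i : Int) - 1) n).toNat 1

-- B's fold, which at step i overwrites row i (twice) using only row i, turns the zero matrix
-- into the map of pvBRow
lemma foldl_set_rows (n : Int) (N : Nat) :
    ∀ (c k : Nat),
      (List.range' k c).foldl (fun m (i : Nat) =>
          let m1 := m.set i ((m.getD i []).set (PySem.Int.mod ((i : Int) + 1) n).toNat 1)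
          m1.set i ((m1.getD i []).set (PySem.Int.mod ((i : Int) - 1) n).toNat 1))
        ((List.range k).map (pvBRow n N) ++ (List.range' k c).map (fun _ => List.replicate N (0 : Int)))
      = (List.range (k + c)).map (pvBRow n N) := by
  intro c
  induction c with
  | zero => intro k; simp
  | succ c ih =>
    intro k
    rw [List.range'_succ]
    simp only [List.map_cons, List.foldl_cons]
    have hlen : ((List.range k).map (pvBRow n N)).length = k := by simp
    have hget1 : (((List.range k).map (pvBRow n N) ++ List.replicate N (0:Int) :: (List.range' (k+1) c).map (fun _ => List.replicate N (0:Int))).getD k [])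
        = List.replicate N (0:Int) := by
      rw [List.getD_eq_getElem?_getD, List.getElem?_append_right (by omega)]
      simp [hlen]
    have hset1 : (((List.range k).map (pvBRow n N) ++ List.replicate N (0:Int) :: (List.range' (k+1) c).map (fun _ => List.replicate N (0:Int))).set k ((List.replicate N (0:Int)).set (PySem.Int.mod ((k : Int) + 1) n).toNat 1))
        = (List.range k).map (pvBRow n N) ++ ((List.replicate N (0:Int)).set (PySem.Int.mod ((k : Int) + 1) n).toNat 1) :: (List.range' (k+1) c).map (fun _ => List.replicate N (0:Int)) := by
      rw [List.set_append_right _ _ (by omega)]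
      simp [hlen]
    have hget2 : (((List.range k).map (pvBRow n N) ++ ((List.replicate N (0:Int)).set (PySem.Int.mod ((k : Int) + 1) n).toNat 1) :: (List.range' (k+1) c).map (fun _ => List.replicate N (0:Int))).getD k []) = ((List.replicate N (0:Int)).set (PySem.Int.mod ((k : Int) + 1) n).toNat 1) := by
      rw [List.getD_eq_getElem?_getD, List.getElem?_append_right (by omega)]
      simp [hlen]
    have hset2 : (((List.range k).map (pvBRow n N) ++ ((List.replicate N (0:Int)).set (PySem.Int.mod ((k : Int) + 1) n).toNat 1) :: (List.range' (k+1) c).map (fun _ => List.replicate N (0:Int))).set k (((List.replicate N (0:Int)).set (PySem.Int.mod ((k : Int) + 1) n).toNat 1).set (PySem.Int.mod ((k : Int) - 1) n).toNat 1))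
        = (List.range (k+1)).map (pvBRow n N) ++ (List.range' (k+1) c).map (fun _ => List.replicate N (0:Int)) := by
      rw [List.set_append_right _ _ (by omega)]
      simp [hlen, List.range_succ, pvBRow]
    simp only [hget1, hset1, hget2, hset2]
    rw [show k + (c + 1) = (k + 1) + c by omega]
    exact ih (k + 1)

-- A's row i equals B's row i, for 0 < n and i < n
lemma row_eq (n : Int) (N : Nat) (hN : n = (N : Int)) (hpos : 0 < n) (i : Nat) (hi : i < N) :
    ((List.range N).map (fun (j : Nat) =>
      if (j : Int) - 1 = (i : Int) ∨ (j : Int) + 1 = (i : Int) then (1 : Int)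
      else if (i : Int) - (j : Int) = n - 1 ∨ (i : Int) - (j : Int) = 1 - n then 1
      else 0))
    = pvBRow n N i := by
  have hm1 : PySem.Int.mod ((i : Int) + 1) n = ((i : Int) + 1) % n :=
    PySem.Int.mod_eq_emod_of_pos hpos
  have hm2 : PySem.Int.mod ((i : Int) - 1) n = ((i : Int) - 1) % n :=
    PySem.Int.mod_eq_emod_of_pos hpos
  have ha : (((i : Int) + 1) % n).toNat = if i + 1 = N then 0 else i + 1 := by
    by_cases h : i + 1 = N
    · have hin : (i : Int) + 1 = n := by omega
      rw [hin, Int.emod_self]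
      simp [h]
    · rw [Int.emod_eq_of_lt (by omega) (by omega)]
      simp only [h, if_false]
      omega
  have hb : (((i : Int) - 1) % n).toNat = if i = 0 then N - 1 else i - 1 := by
    by_cases h : i = 0
    · subst h
      have h1 : ((0 : Int) - 1) % n = n - 1 := by
        conv_lhs => rw [show (0 : Int) - 1 = (n - 1) + n * (-1) by ring]
        rw [Int.add_mul_emod_self_left]
        exact Int.emod_eq_of_lt (by omega) (by omega)
      rw [Nat.cast_zero, h1]
      simp only [if_true]
      omega
    · rw [Int.emod_eq_of_lt (by omega) (by omega)]
      simp only [h, if_false]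
      omega
  apply List.ext_getElem
  · simp [pvBRow]
  · intro j hj hj'
    have hjN : j < N := by simpa using hj
    simp only [pvBRow, List.getElem_map, List.getElem_range, List.getElem_set,
      List.getElem_replicate, hm1, hm2, ha, hb]
    split_ifs <;> omega

-- ===== VERDICT (by name: the statement is the Claim_ definition above) =====
theorem tomer_cycle_spec : Claim_equal_tomer_cycle := by
  intro n _
  unfold Spec_tomer_cycle tomer_cycle tomer_cycle_alt
  by_cases hn : n ≤ 0
  · simp [Int.toNat_of_nonpos hn]
  · have hpos : 0 < n := by omega
    have hN : n = ((n.toNat : Nat) : Int) := by omega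
    have key := foldl_set_rows n n.toNat n.toNat 0
    simp only [← List.range_eq_range', Nat.zero_add, List.range_zero, List.map_nil,
      List.nil_append] at key
    rw [key]
    apply List.map_congr_left
    intro i hi
    rw [List.mem_range] at hi
    exact row_eq n n.toNat hN hpos i hi
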